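-- pv_equiv track=rewrite | github.com/meenbeese/scripts | python/organize_imports.py | sort_imports
-- ===== SOURCE A (Python) =====
-- from collections import defaultdict
--
-- IMPORT_ORDER = [
--     "static",
--     "android",
--     "androidx",
--     "com",
--     "net",
--     "org",
--     "kotlin",
--     "kotlinx",
--     "java",
--     "javax",
-- ]
--
-- def sort_imports(imports):
--     # First group by top-level package according to IMPORT_ORDER
--     groups = defaultdict(list)
--     for is_static, path, line in imports:
--         if is_static:
--             groups["static"].append((path, line))
--             continue
--
--         top = path.split(".")[0]
--         # Use the exact group from IMPORT_ORDER
--         for order_group in IMPORT_ORDER: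
--             if top == order_group:
--                 groups[order_group].append((path, line))
--                 break
--         else:
--             groups["zzz_other"].append((path, line))
--
--     ordered = []
--
--     for group in IMPORT_ORDER:
--         if group in groups and groups[group]:
--             ordered.extend([line for _, line in sorted(groups[group])])
--             ordered.append("")
--     if "zzz_other" in groups and groups["zzz_other"]:
--         ordered.extend([line for _, line in sorted(groups["zzz_other"])])
--         ordered.append("")
--
--     # Remove trailing blank lines
--     while ordered and ordered[-1] == "":
--         ordered.pop()
--
--     return ordered
-- ===== SOURCE B (Python) =====
-- IMPORT_ORDER = [
--     "static",
--     "android",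
--     "androidx",
--     "com",
--     "net",
--     "org",
--     "kotlin",
--     "kotlinx",
--     "java",
--     "javax",
-- ]
--
-- def _rank(imp):
--     is_static, path, _line = imp
--     if is_static:
--         return 0
--     top = path.split(".")[0]
--     if top in IMPORT_ORDER:
--         return IMPORT_ORDER.index(top)
--     return len(IMPORT_ORDER)
--
-- def sort_imports(imports):
--     # one global stable sort: by (path, line) first, then by group rank
--     by_path = sorted(imports, key=lambda t: (t[1], t[2]))
--     by_rank = sorted(by_path, key=_rank)
--
--     out = []
--     prev = None
--     for t in by_rank:
--         r = _rank(t)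
--         if prev is not None and r != prev:
--             out.append("")
--         out.append(t[2])
--         prev = r
--
--     # remove trailing blank lines
--     while out and out[-1] == "":
--         out.pop()
--     return out
-- ===== Notes on version B (the rewrite author's own statement) =====
-- stated objective: simpler
-- what changed: Replaced the defaultdict bucketing with its for/else group scan and eleven per-group sorts by a single global stable sort keyed by (path,line) then by a numeric group rank, emitting blank separator lines at rank boundaries in one pass.
import Mathlib
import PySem

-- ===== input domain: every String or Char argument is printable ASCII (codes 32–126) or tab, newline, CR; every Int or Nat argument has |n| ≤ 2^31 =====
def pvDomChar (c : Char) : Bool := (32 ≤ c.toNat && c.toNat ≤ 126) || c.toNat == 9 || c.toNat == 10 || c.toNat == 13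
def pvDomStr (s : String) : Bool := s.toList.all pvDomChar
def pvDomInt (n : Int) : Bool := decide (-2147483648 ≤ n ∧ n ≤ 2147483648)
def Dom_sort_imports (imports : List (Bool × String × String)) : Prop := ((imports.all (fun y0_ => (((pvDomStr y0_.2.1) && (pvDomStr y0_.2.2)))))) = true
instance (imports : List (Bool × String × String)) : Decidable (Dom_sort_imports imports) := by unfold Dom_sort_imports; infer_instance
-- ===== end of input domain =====

-- B replaces A's dict-bucketing plus eleven per-group sorts by one global stable sort
-- keyed by (path,line) then by group rank, with blank lines emitted at rank boundaries
-- in a single pass (objective: simpler; same asymptotic cost).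


-- ===== PORT A =====
def IMPORT_ORDER : List String :=
  ["static", "android", "androidx", "com", "net", "org", "kotlin", "kotlinx", "java", "javax"]

-- top = path.split(".")[0]  (split with a non-empty separator never returns [], so headD is exact)
def pyTopA (path : String) : String :=
  ((PySem.Str.split? path ".").getD []).headD ""

-- the 'for order_group in IMPORT_ORDER: if top == order_group: … break / else: …' loop
def findGroupA : List String → String → String
  | [], _ => "zzz_other"
  | g :: rest, top => if top == g then g else findGroupA rest top

-- 'while ordered and ordered[-1] == "": ordered.pop()'
def stripTrailA (l : List String) : List String :=
  if h : l.getLast? = some "" then stripTrailA l.dropLast else l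
termination_by l.length
decreasing_by
  cases l with
  | nil => simp at h
  | cons a t => simp [List.length_dropLast]

def sort_imports (imports : List (Bool × String × String)) : List String :=
  let groups : PySem.Dict String (List (String × String)) :=
    imports.foldl
      (fun d t =>
        if t.1 then d.modify "static" [] (fun l => l ++ [(t.2.1, t.2.2)])
        else d.modify (findGroupA IMPORT_ORDER (pyTopA t.2.1)) [] (fun l => l ++ [(t.2.1, t.2.2)]))
      PySem.Dict.empty
  let ordered :=
    IMPORT_ORDER.foldl
      (fun acc g =>
        if groups.contains g ∧ groups.getD g [] ≠ [] then
          acc ++ (PySem.List.sorted2 (groups.getD g []) (fun p => p.1) (fun p => p.2)).map (fun p => p.2) ++ [""]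
        else acc)
      []
  let ordered :=
    if groups.contains "zzz_other" ∧ groups.getD "zzz_other" [] ≠ [] then
      ordered ++ (PySem.List.sorted2 (groups.getD "zzz_other" []) (fun p => p.1) (fun p => p.2)).map (fun p => p.2) ++ [""]
    else ordered
  stripTrailA ordered

-- ===== PORT B =====
def IMPORT_ORDER_B : List String :=
  ["static", "android", "androidx", "com", "net", "org", "kotlin", "kotlinx", "java", "javax"]

def pyTopB (path : String) : String :=
  ((PySem.Str.split? path ".").getD []).headD ""

def rankB (t : Bool × String × String) : Int :=
  if t.1 then 0
  else
    match PySem.List.index? IMPORT_ORDER_B (pyTopB t.2.1) with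
    | some i => (i : Int)
    | none => (IMPORT_ORDER_B.length : Int)

def stripTrailB (l : List String) : List String :=
  if h : l.getLast? = some "" then stripTrailB l.dropLast else l
termination_by l.length
decreasing_by
  cases l with
  | nil => simp at h
  | cons a t => simp [List.length_dropLast]

-- one iteration of B's output loop: emit a blank when the group rank changes, then the line
def stepB (s : List String × Option Int) (t : Bool × String × String) : List String × Option Int :=
  let r := rankB t
  let out := match s.2 with
    | none => s.1
    | some p => if r ≠ p then s.1 ++ [""] else s.1
  (out ++ [t.2.2], some r)

def sort_imports_alt (imports : List (Bool × String × String)) : List String :=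
  let byPath := PySem.List.sorted2 imports (fun t => t.2.1) (fun t => t.2.2)
  let byRank := PySem.List.sorted byPath rankB
  let st := byRank.foldl stepB ([], none)
  stripTrailB st.1

-- ===== PRECONDITION & SPEC =====
def Spec_sort_imports (imports : List (Bool × String × String)) (out : List String) : Prop := out = sort_imports_alt imports
instance (imports : List (Bool × String × String)) (out : List String) : Decidable (Spec_sort_imports imports out) := by unfold Spec_sort_imports; infer_instance

-- ===== CLAIM (what is proved, stated in full; the proofs are below) =====
def Claim_equal_sort_imports : Prop := ∀ (imports : List (Bool × String × String)), Dom_sort_imports imports → Spec_sort_imports imports (sort_imports imports)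

-- ===== LEMMAS AND PROOFS =====

-- proof-side abbreviations
def pvProj (t : Bool × String × String) : String × String := (t.2.1, t.2.2)
def pvK (t : Bool × String × String) : Lex (String × String) := toLex (t.2.1, t.2.2)
def pvGroupOf (t : Bool × String × String) : String :=
  if t.1 then "static" else findGroupA IMPORT_ORDER (pyTopA t.2.1)
def pvLabels : List String := IMPORT_ORDER ++ ["zzz_other"]
def pvR : List Int := [0, 1, 2, 3, 4, 5, 6, 7, 8, 9, 10]
def pvBkt (xs : List (Bool × String × String)) (g : String) : List (Bool × String × String) :=
  xs.filter (fun t => decide (pvGroupOf t = g))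
def pvEs (blk : Int → List (Bool × String × String)) (R : List Int) : List String :=
  R.flatMap (fun r => if blk r = [] then [] else "" :: (blk r).map (fun t => t.2.2))
def pvEn (blk : Int → List (Bool × String × String)) : List Int → List String
  | [] => []
  | r :: R => if blk r = [] then pvEn blk R else (blk r).map (fun t => t.2.2) ++ pvEs blk R
def pvJ (blk : Int → List (Bool × String × String)) (R : List Int) : List String :=
  R.flatMap (fun r => if blk r = [] then [] else (blk r).map (fun t => t.2.2) ++ [""])

-- generic facts about PySem's stable insertion sort
theorem pv_flatMap_congr {a b : Type} (l : List a) (f g : a -> List b)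
    (h : forall x, x ∈ l -> f x = g x) : l.flatMap f = l.flatMap g := by
  induction l with
  | nil => rfl
  | cons x xs ih =>
      simp only [List.flatMap_cons, h x (List.mem_cons_self), ih (fun y hy => h y (List.mem_cons_of_mem _ hy))]

theorem pv_insertBy_eq {a : Type} (before : a -> a -> Bool) (x : a) (s : List a) :
    PySem.List.insertBy before x s
      = s.takeWhile (fun y => !before x y) ++ x :: s.dropWhile (fun y => !before x y) := by
  induction s with
  | nil => simp [PySem.List.insertBy]
  | cons y ys ih =>
      by_cases h : before x y
      · simp [PySem.List.insertBy, h]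
      · simp [PySem.List.insertBy, h, ih]


theorem pv_insertBy_congr {a : Type} (b1 b2 : a -> a -> Bool) (h : forall p q, b1 p q = b2 p q)
    (x : a) (s : List a) : PySem.List.insertBy b1 x s = PySem.List.insertBy b2 x s := by
  induction s with
  | nil => rfl
  | cons y ys ih => simp [PySem.List.insertBy, h, ih]

theorem pv_filter_comm {a : Type} (p q : a -> Bool) (l : List a) :
    (l.filter p).filter q = (l.filter q).filter p := by
  rw [List.filter_filter, List.filter_filter]
  exact List.filter_congr (fun t _ => Bool.and_comm _ _)

theorem pv_top_eq : pyTopA = pyTopB := rfl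

theorem pv_order_eq : IMPORT_ORDER = IMPORT_ORDER_B := rfl

theorem pv_tw_filter {a k : Type} [LinearOrder k] (key : a -> k) (c : k) (s : List a)
    (hs : s.Pairwise (fun p q => key p ≤ key q)) :
    s.takeWhile (fun y => !decide (c < key y)) = s.filter (fun y => !decide (c < key y)) := by
  induction s with
  | nil => rfl
  | cons y ys ih =>
      rcases List.pairwise_cons.mp hs with ⟨hy, htl⟩
      by_cases h : c < key y
      · simp only [List.takeWhile_cons, List.filter_cons, h, decide_true, Bool.not_true,
          Bool.false_eq_true, if_false]
        symm
        rw [List.filter_eq_nil_iff]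
        intro q hq
        simp [lt_of_lt_of_le h (hy q hq)]
      · simp [List.takeWhile_cons, List.filter_cons, h, ih htl]


theorem pv_dw_filter {a k : Type} [LinearOrder k] (key : a -> k) (c : k) (s : List a)
    (hs : s.Pairwise (fun p q => key p ≤ key q)) :
    s.dropWhile (fun y => !decide (c < key y)) = s.filter (fun y => decide (c < key y)) := by
  induction s with
  | nil => rfl
  | cons y ys ih =>
      rcases List.pairwise_cons.mp hs with ⟨hy, htl⟩
      by_cases h : c < key y
      · simp only [List.dropWhile_cons, List.filter_cons, h, decide_true, Bool.not_true,
          Bool.false_eq_true, if_false, if_true]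
        congr 1
        symm
        rw [List.filter_eq_self]
        intro q hq
        simp [lt_of_lt_of_le h (hy q hq)]
      · simp [List.dropWhile_cons, List.filter_cons, h, ih htl]


theorem pv_ins_sorted {a k : Type} [LinearOrder k] (key : a -> k) (x : a) (s : List a)
    (hs : s.Pairwise (fun p q => key p ≤ key q)) :
    PySem.List.insertBy (fun p q => decide (key p < key q)) x s
      = s.filter (fun y => !decide (key x < key y)) ++ x :: s.filter (fun y => decide (key x < key y)) := by
  rw [pv_insertBy_eq]
  rw [pv_tw_filter key (key x) s hs, pv_dw_filter key (key x) s hs]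


theorem pv_sorted_snoc {a k : Type} [LinearOrder k] (key : a -> k) (xs : List a) (x : a) :
    PySem.List.sorted (xs ++ [x]) key
      = PySem.List.insertBy (fun p q => decide (key p < key q)) x (PySem.List.sorted xs key) := by
  rw [PySem.List.sorted_eq_foldl_insertBy, PySem.List.sorted_eq_foldl_insertBy,
    List.foldl_append]
  rfl


theorem pv_filter_part {a k : Type} [LinearOrder k] (key : a -> k) (c : k) (s : List a)
    (hs : s.Pairwise (fun p q => key p ≤ key q)) :
    s.filter (fun y => !decide (c < key y)) ++ s.filter (fun y => decide (c < key y)) = s := by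
  rw [← pv_tw_filter key c s hs, ← pv_dw_filter key c s hs]
  exact List.takeWhile_append_dropWhile


theorem pv_filter_sorted {a k : Type} [LinearOrder k] (key : a -> k) (p : a -> Bool) (ys : List a) :
    (PySem.List.sorted ys key).filter p = PySem.List.sorted (ys.filter p) key := by
  induction ys using List.reverseRecOn with
  | nil => simp [PySem.List.sorted]
  | append_singleton xs x ih =>
      have hS := PySem.List.sorted_pairwise xs key
      have hSf : ((PySem.List.sorted xs key).filter p).Pairwise (fun s t => key s ≤ key t) :=
        hS.filter p
      rw [pv_sorted_snoc key xs x, pv_ins_sorted key x _ hS, List.filter_append, List.filter_cons,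
        List.filter_append]
      by_cases hp : p x
      · simp only [hp, if_true]
        rw [show List.filter p [x] = [x] from by simp [hp],
          pv_sorted_snoc key (xs.filter p) x, ← ih, pv_ins_sorted key x _ hSf,
          pv_filter_comm (fun y => !decide (key x < key y)) p (PySem.List.sorted xs key),
          pv_filter_comm (fun y => decide (key x < key y)) p (PySem.List.sorted xs key)]
      · simp only [hp, Bool.false_eq_true, if_false]
        rw [show List.filter p [x] = [] from by simp [hp], List.append_nil, ← ih,
          pv_filter_comm (fun y => !decide (key x < key y)) p (PySem.List.sorted xs key),
          pv_filter_comm (fun y => decide (key x < key y)) p (PySem.List.sorted xs key)]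
        exact pv_filter_part key (key x) _ hSf

theorem pv_filter_key_const {a k : Type} [LinearOrder k] (key : a -> k) (p : k -> Bool) (r : k) (ys : List a) :
    (ys.filter (fun y => decide (key y = r))).filter (fun y => p (key y))
      = if p r then ys.filter (fun y => decide (key y = r)) else [] := by
  induction ys with
  | nil => cases hp : p r <;> simp [hp]
  | cons t ts ih =>
      by_cases h : key t = r
      · by_cases hp : p r <;> simp [List.filter_cons, h, hp, ih]
      · simp [List.filter_cons, h, ih]


theorem pv_sorted_flat {a k : Type} [LinearOrder k] (key : a -> k) (R : List k)
    (hR : R.Pairwise (· < ·)) (ys : List a) (hy : forall y, y ∈ ys -> key y ∈ R) :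
    PySem.List.sorted ys key = R.flatMap (fun r => ys.filter (fun y => decide (key y = r))) := by
  induction ys using List.reverseRecOn with
  | nil =>
      simp only [PySem.List.sorted, List.foldl_nil, List.filter_nil]
      symm
      rw [List.flatMap_eq_nil_iff]
      intro r hr
      rfl
  | append_singleton xs x ih =>
      have hx : key x ∈ R := hy x (by simp)
      have hxs : ∀ y ∈ xs, key y ∈ R := fun y hy' => hy y (by simp [hy'])
      have hS := PySem.List.sorted_pairwise xs key
      rw [pv_sorted_snoc key xs x, pv_ins_sorted key x _ hS, ih hxs,
        List.filter_flatMap, List.filter_flatMap]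
      obtain ⟨R1, R2, hsplit⟩ := List.append_of_mem hx
      subst hsplit
      rcases List.pairwise_append.mp hR with ⟨hR1, hR2c, hcross⟩
      rcases List.pairwise_cons.mp hR2c with ⟨hx2, hR2⟩
      have hlt1 : ∀ r ∈ R1, r < key x := fun r hr => hcross r hr (key x) List.mem_cons_self
      rw [List.flatMap_append, List.flatMap_append, List.flatMap_append,
        List.flatMap_cons, List.flatMap_cons, List.flatMap_cons]
      have hA1 : R1.flatMap (fun r => (xs.filter (fun y => decide (key y = r))).filter
            (fun y => !decide (key x < key y)))
          = R1.flatMap (fun r => (xs ++ [x]).filter (fun y => decide (key y = r))) := by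
        refine pv_flatMap_congr _ _ _ (fun r hr => ?_)
        rw [pv_filter_key_const key (fun c => !decide (key x < c)) r xs, List.filter_append]
        have hr' := hlt1 r hr
        simp [not_lt_of_gt hr', ne_of_gt hr']
      have hA2 : (xs.filter (fun y => decide (key y = key x))).filter
            (fun y => !decide (key x < key y))
          = xs.filter (fun y => decide (key y = key x)) := by
        rw [pv_filter_key_const key (fun c => !decide (key x < c)) (key x) xs]
        simp
      have hA3 : R2.flatMap (fun r => (xs.filter (fun y => decide (key y = r))).filter
            (fun y => !decide (key x < key y))) = [] := by
        rw [List.flatMap_eq_nil_iff]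
        intro r hr
        rw [pv_filter_key_const key (fun c => !decide (key x < c)) r xs]
        simp [hx2 r hr]
      have hB1 : R1.flatMap (fun r => (xs.filter (fun y => decide (key y = r))).filter
            (fun y => decide (key x < key y))) = [] := by
        rw [List.flatMap_eq_nil_iff]
        intro r hr
        rw [pv_filter_key_const key (fun c => decide (key x < c)) r xs]
        simp [not_lt_of_gt (hlt1 r hr)]
      have hB2 : (xs.filter (fun y => decide (key y = key x))).filter
            (fun y => decide (key x < key y)) = [] := by
        rw [pv_filter_key_const key (fun c => decide (key x < c)) (key x) xs]
        simp
      have hB3 : R2.flatMap (fun r => (xs.filter (fun y => decide (key y = r))).filter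
            (fun y => decide (key x < key y)))
          = R2.flatMap (fun r => (xs ++ [x]).filter (fun y => decide (key y = r))) := by
        refine pv_flatMap_congr _ _ _ (fun r hr => ?_)
        rw [pv_filter_key_const key (fun c => decide (key x < c)) r xs, List.filter_append]
        have hr' := hx2 r hr
        simp [hr', ne_of_lt hr']
      have hC : (xs ++ [x]).filter (fun y => decide (key y = key x))
          = xs.filter (fun y => decide (key y = key x)) ++ [x] := by
        rw [List.filter_append]
        simp
      rw [hA1, hA2, hA3, hB1, hB2, hB3, hC]
      simp [List.append_assoc]


theorem pv_map_insertBy {a b k : Type} [LinearOrder k] (proj : a -> b) (keyA : a -> k) (keyB : b -> k)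
    (h : forall t, keyB (proj t) = keyA t) (x : a) (s : List a) :
    (PySem.List.insertBy (fun p q => decide (keyA p < keyA q)) x s).map proj
      = PySem.List.insertBy (fun p q => decide (keyB p < keyB q)) (proj x) (s.map proj) := by
  induction s with
  | nil => simp [PySem.List.insertBy, h]
  | cons y ys ih =>
      by_cases hc : keyA x < keyA y
      · simp [PySem.List.insertBy, h, hc]
      · simp [PySem.List.insertBy, h, hc, ih]


theorem pv_map_sorted {a b k : Type} [LinearOrder k] (proj : a -> b) (keyA : a -> k) (keyB : b -> k)
    (h : forall t, keyB (proj t) = keyA t) (l : List a) :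
    (PySem.List.sorted l keyA).map proj = PySem.List.sorted (l.map proj) keyB := by
  induction l using List.reverseRecOn with
  | nil => simp [PySem.List.sorted]
  | append_singleton xs x ih =>
      rw [pv_sorted_snoc keyA xs x, pv_map_insertBy proj keyA keyB h, ih, List.map_append,
        List.map_singleton, pv_sorted_snoc keyB]


theorem pv_sorted2_eq_lex {a k1 k2 : Type} [LinearOrder k1] [LinearOrder k2]
    (l : List a) (f1 : a -> k1) (f2 : a -> k2) :
    PySem.List.sorted2 l f1 f2 = PySem.List.sorted l (fun x => toLex (f1 x, f2 x)) := by
  simp only [PySem.List.sorted2, PySem.List.sorted, Bool.false_eq_true, if_false]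
  refine PySem.List.foldl_congr_mem l _ _ [] (fun acc x _ => ?_)
  refine pv_insertBy_congr _ _ (fun p q => ?_) x acc
  rcases lt_trichotomy (f1 p) (f1 q) with hc | hc | hc
  · simp [Prod.Lex.lt_iff, hc, le_of_lt hc, not_lt_of_gt hc]
  · simp [Prod.Lex.lt_iff, hc, lt_irrefl]
  · simp [Prod.Lex.lt_iff, hc, not_lt_of_gt hc, ne_of_gt hc]


-- A-side: characterising the groups dict
theorem pv_stepA (d : PySem.Dict String (List (String × String))) (t : Bool × String × String) :
    (if t.1 then d.modify "static" [] (fun l => l ++ [(t.2.1, t.2.2)])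
     else d.modify (findGroupA IMPORT_ORDER (pyTopA t.2.1)) [] (fun l => l ++ [(t.2.1, t.2.2)]))
      = d.insert (pvGroupOf t) (d.getD (pvGroupOf t) [] ++ [pvProj t]) := by
  by_cases hb : t.1 <;> simp [pvGroupOf, pvProj, PySem.Dict.modify, hb]


theorem pv_groups_getD (xs : List (Bool × String × String)) (d : PySem.Dict String (List (String × String))) (g : String) :
    ((xs.foldl
        (fun d t =>
          if t.1 then d.modify "static" [] (fun l => l ++ [(t.2.1, t.2.2)])
          else d.modify (findGroupA IMPORT_ORDER (pyTopA t.2.1)) [] (fun l => l ++ [(t.2.1, t.2.2)]))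
        d).getD g [])
      = d.getD g [] ++ (pvBkt xs g).map pvProj := by
  induction xs generalizing d with
  | nil => simp [pvBkt]
  | cons t ts ih =>
      rw [List.foldl_cons, pv_stepA, ih]
      by_cases h : pvGroupOf t = g
      · simp [pvBkt, List.filter_cons, h, PySem.Dict.getD_insert]
      · simp [pvBkt, List.filter_cons, h, PySem.Dict.getD_insert, Ne.symm h]


theorem pv_groups_contains (xs : List (Bool × String × String)) (d : PySem.Dict String (List (String × String))) (g : String) :
    ((xs.foldl
        (fun d t =>
          if t.1 then d.modify "static" [] (fun l => l ++ [(t.2.1, t.2.2)])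
          else d.modify (findGroupA IMPORT_ORDER (pyTopA t.2.1)) [] (fun l => l ++ [(t.2.1, t.2.2)]))
        d).contains g)
      = (d.contains g || xs.any (fun t => decide (pvGroupOf t = g))) := by
  induction xs generalizing d with
  | nil => simp
  | cons t ts ih =>
      rw [List.foldl_cons, pv_stepA, ih]
      by_cases h : pvGroupOf t = g
      · simp [PySem.Dict.contains_insert, h, List.any_cons]
      · have hbe : (g == pvGroupOf t) = false := by
          rw [beq_eq_false_iff_ne]
          exact Ne.symm h
        simp [PySem.Dict.contains_insert, hbe, h, List.any_cons]


-- rank / group-label correspondence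
theorem pv_findGroup_mem (L : List String) (top : String) (h : top ∈ L) : findGroupA L top = top := by
  induction L with
  | nil => cases h
  | cons gg L ih =>
      by_cases hg : top = gg
      · simp [findGroupA, hg]
      · rcases List.mem_cons.mp h with h1 | h1
        · exact absurd h1 hg
        · simp [findGroupA, hg, ih h1]


theorem pv_findGroup_not_mem (L : List String) (top : String) (h : top ∉ L) : findGroupA L top = "zzz_other" := by
  induction L with
  | nil => rfl
  | cons gg L ih =>
      have hg : top ≠ gg := fun he => h (by simp [he])
      simp only [findGroupA, beq_iff_eq, hg, if_false]
      exact ih (fun hm => h (List.mem_cons_of_mem _ hm))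


theorem pv_rank_bounds (t : Bool × String × String) : 0 ≤ rankB t ∧ rankB t ≤ 10 := by
  unfold rankB
  by_cases hb : t.1
  · simp [hb]
  · simp only [hb, Bool.false_eq_true, if_false]
    cases hidx : PySem.List.index? IMPORT_ORDER_B (pyTopB t.2.1) with
    | none => simp [IMPORT_ORDER_B]
    | some i =>
        obtain ⟨hk, -, -⟩ := PySem.List.getElem_of_index?_eq_some hidx
        have h10 : i < 10 := by simpa [IMPORT_ORDER_B] using hk
        constructor
        · show (0 : Int) ≤ (i : Int)
          omega
        · show (i : Int) ≤ 10
          omega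


theorem pv_group_eq (t : Bool × String × String) : pvGroupOf t = pvLabels.getD (rankB t).toNat "" := by
  unfold pvGroupOf rankB
  rw [pv_top_eq, pv_order_eq]
  by_cases hb : t.1
  · simp [hb, pvLabels, IMPORT_ORDER]
  · simp only [hb, Bool.false_eq_true, if_false]
    cases hidx : PySem.List.index? IMPORT_ORDER_B (pyTopB t.2.1) with
    | none =>
        have hnm : pyTopB t.2.1 ∉ IMPORT_ORDER_B := (PySem.List.index?_eq_none_iff _ _).mp hidx
        rw [pv_findGroup_not_mem _ _ hnm]
        rfl
    | some i =>
        obtain ⟨hk, hget, -⟩ := PySem.List.getElem_of_index?_eq_some hidx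
        have hmem : pyTopB t.2.1 ∈ IMPORT_ORDER_B := by rw [← hget]; exact List.getElem_mem hk
        rw [pv_findGroup_mem _ _ hmem, ← hget]
        have h10 : i < 10 := by simpa [IMPORT_ORDER_B] using hk
        interval_cases i <;> rfl


theorem pv_label_inj (p q : Int) (hp0 : 0 ≤ p) (hp1 : p ≤ 10) (hq0 : 0 ≤ q) (hq1 : q ≤ 10)
    (h : pvLabels.getD p.toNat "" = pvLabels.getD q.toNat "") : p = q := by
  interval_cases p <;> interval_cases q <;> revert h <;> decide


theorem pv_filter_rank_group (xs : List (Bool × String × String)) (r : Int) (h0 : 0 ≤ r) (h1 : r ≤ 10) :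
    pvBkt xs (pvLabels.getD r.toNat "") = xs.filter (fun t => decide (rankB t = r)) := by
  unfold pvBkt
  refine List.filter_congr (fun t _ => ?_)
  rcases pv_rank_bounds t with ⟨ha, hb⟩
  rw [pv_group_eq t]
  simp only [decide_eq_decide]
  exact ⟨fun he => pv_label_inj _ _ ha hb h0 h1 he, fun he => by rw [he]⟩


-- B-side output loop
theorem pv_bld_const (r : Int) (block : List (Bool × String × String))
    (hb : forall t, t ∈ block -> rankB t = r) (acc : List String) :
    block.foldl stepB (acc, some r) = (acc ++ block.map (fun t => t.2.2), some r) := by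
  induction block generalizing acc with
  | nil => simp
  | cons b bs ih =>
      have hr := hb b List.mem_cons_self
      rw [List.foldl_cons,
        show stepB (acc, some r) b = (acc ++ [b.2.2], some r) from by simp [stepB, hr],
        ih (fun t ht => hb t (List.mem_cons_of_mem _ ht))]
      simp


theorem pv_bld_from_none (r : Int) (block : List (Bool × String × String))
    (hb : forall t, t ∈ block -> rankB t = r) (hne : block ≠ []) (acc : List String) :
    block.foldl stepB (acc, none) = (acc ++ block.map (fun t => t.2.2), some r) := by
  cases block with
  | nil => cases hne rfl
  | cons b bs =>
      have hr := hb b List.mem_cons_self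
      rw [List.foldl_cons,
        show stepB (acc, none) b = (acc ++ [b.2.2], some r) from by simp [stepB, hr],
        pv_bld_const r bs (fun t ht => hb t (List.mem_cons_of_mem _ ht))]
      simp

theorem pv_bld_from_some (r p0 : Int) (hp : p0 ≠ r) (block : List (Bool × String × String))
    (hb : forall t, t ∈ block -> rankB t = r) (hne : block ≠ []) (acc : List String) :
    block.foldl stepB (acc, some p0) = (acc ++ [""] ++ block.map (fun t => t.2.2), some r) := by
  cases block with
  | nil => cases hne rfl
  | cons b bs =>
      have hr := hb b List.mem_cons_self
      rw [List.foldl_cons,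
        show stepB (acc, some p0) b = (acc ++ [""] ++ [b.2.2], some r) from by
          simp [stepB, hr, Ne.symm hp],
        pv_bld_const r bs (fun t ht => hb t (List.mem_cons_of_mem _ ht))]
      simp

theorem pv_main_some (blk : Int → List (Bool × String × String)) :
    forall (R : List Int) (acc : List String) (p0 : Int), R.Nodup -> p0 ∉ R ->
    (forall r, r ∈ R -> forall t, t ∈ blk r -> rankB t = r) ->
    ∃ q : Int, (R.flatMap blk).foldl stepB (acc, some p0) = (acc ++ pvEs blk R, some q) ∧ (q = p0 ∨ q ∈ R) := by
  intro R
  induction R with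
  | nil => exact fun acc p0 _ _ _ => ⟨p0, by simp [pvEs], Or.inl rfl⟩
  | cons r R' ih =>
      intro acc p0 hnd hp0 hrk
      rw [List.flatMap_cons, List.foldl_append]
      rcases List.nodup_cons.mp hnd with ⟨hrR', hnd'⟩
      by_cases hblk : blk r = []
      · rw [hblk, List.foldl_nil]
        obtain ⟨q, heq, hq⟩ := ih acc p0 hnd' (fun hm => hp0 (List.mem_cons_of_mem _ hm))
            (fun r' hr' t ht => hrk r' (List.mem_cons_of_mem _ hr') t ht)
        refine ⟨q, ?_, ?_⟩
        · rw [heq]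
          simp [pvEs, hblk]
        · rcases hq with h | h
          · exact Or.inl h
          · exact Or.inr (List.mem_cons_of_mem _ h)
      · have hne : p0 ≠ r := fun he => hp0 (by simp [he])
        rw [pv_bld_from_some r p0 hne (blk r) (fun t ht => hrk r List.mem_cons_self t ht)
            hblk acc]
        obtain ⟨q, heq, hq⟩ := ih (acc ++ [""] ++ (blk r).map (fun t => t.2.2)) r hnd' hrR'
            (fun r' hr' t ht => hrk r' (List.mem_cons_of_mem _ hr') t ht)
        refine ⟨q, ?_, ?_⟩
        · rw [heq]
          simp [pvEs, hblk, List.append_assoc]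
        · rcases hq with h | h
          · exact Or.inr (by rw [h]; exact List.mem_cons_self)
          · exact Or.inr (List.mem_cons_of_mem _ h)


theorem pv_main_none (blk : Int → List (Bool × String × String)) (R : List Int) (hnd : R.Nodup)
    (hr : forall r, r ∈ R -> forall t, t ∈ blk r -> rankB t = r) :
    ((R.flatMap blk).foldl stepB ([], none)).1 = pvEn blk R := by
  revert hnd hr
  induction R with
  | nil =>
      intro _ _
      rfl
  | cons r R' ih =>
      intro hnd hr
      rcases List.nodup_cons.mp hnd with ⟨hrR', hnd'⟩
      rw [List.flatMap_cons, List.foldl_append]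
      by_cases hblk : blk r = []
      · rw [hblk, List.foldl_nil,
          ih hnd' (fun r' hr' t ht => hr r' (List.mem_cons_of_mem _ hr') t ht)]
        simp [pvEn, hblk]
      · rw [pv_bld_from_none r (blk r) (fun t ht => hr r List.mem_cons_self t ht) hblk []]
        obtain ⟨q, heq, -⟩ := pv_main_some blk R' ([] ++ (blk r).map (fun t => t.2.2)) r hnd' hrR'
            (fun r' hr' t ht => hr r' (List.mem_cons_of_mem _ hr') t ht)
        rw [heq]
        simp [pvEn, hblk]


-- joining shapes and trailing-blank stripping
theorem pvEs_cons (blk : Int → List (Bool × String × String)) (r : Int) (R : List Int) :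
    pvEs blk (r :: R) = (if blk r = [] then [] else "" :: (blk r).map (fun t => t.2.2)) ++ pvEs blk R := rfl

theorem pvJ_cons (blk : Int → List (Bool × String × String)) (r : Int) (R : List Int) :
    pvJ blk (r :: R) = (if blk r = [] then [] else (blk r).map (fun t => t.2.2) ++ [""]) ++ pvJ blk R := rfl

theorem pv_shift (blk : Int → List (Bool × String × String)) (R : List Int) :
    pvEs blk R ++ [""] = "" :: pvJ blk R := by
  induction R with
  | nil => rfl
  | cons r R' ih =>
      rw [pvEs_cons, pvJ_cons]
      by_cases hblk : blk r = []
      · simpa [hblk] using ih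
      · simp [hblk, List.append_assoc, ih]


theorem pv_ne (blk : Int → List (Bool × String × String)) (R : List Int) :
    (pvEn blk R = [] ∧ pvJ blk R = []) ∨ pvJ blk R = pvEn blk R ++ [""] := by
  induction R with
  | nil => exact Or.inl ⟨rfl, rfl⟩
  | cons r R' ih =>
      by_cases hblk : blk r = []
      · rcases ih with ⟨h1, h2⟩ | h
        · exact Or.inl ⟨by simp [pvEn, hblk, h1], by rw [pvJ_cons]; simp [hblk, h2]⟩
        · refine Or.inr ?_
          rw [pvJ_cons]
          simp [pvEn, hblk, h]
      · refine Or.inr ?_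
        rw [pvJ_cons]
        simp [pvEn, hblk, pv_shift, List.append_assoc]


theorem pv_strip_snoc (x : List String) : stripTrailA (x ++ [""]) = stripTrailA x := by
  conv_lhs => rw [stripTrailA]
  simp [List.getLast?_concat, List.dropLast_concat]


theorem pv_strip_eq_aux : ∀ (n : Nat) (l : List String), l.length ≤ n → stripTrailA l = stripTrailB l := by
  intro n
  induction n with
  | zero =>
      intro l hl
      have hnil : l = [] := List.eq_nil_of_length_eq_zero (Nat.le_zero.mp hl)
      subst hnil
      rw [stripTrailA, stripTrailB]
      simp
  | succ n ih =>
      intro l hl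
      rw [stripTrailA, stripTrailB]
      by_cases h : l.getLast? = some ""
      · rw [dif_pos h, dif_pos h]
        refine ih l.dropLast ?_
        simp only [List.length_dropLast]
        omega
      · rw [dif_neg h, dif_neg h]

theorem pv_stripA_eq_B (l : List String) : stripTrailA l = stripTrailB l := by
  exact pv_strip_eq_aux l.length l le_rfl


theorem pv_strip_J (blk : Int → List (Bool × String × String)) (R : List Int) :
    stripTrailA (pvJ blk R) = stripTrailA (pvEn blk R) := by
  rcases pv_ne blk R with ⟨h1, h2⟩ | h
  · rw [h1, h2]
  · rw [h, pv_strip_snoc]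


-- ===== VERDICT (by name: the statement is the Claim_ definition above) =====
theorem sort_imports_spec : Claim_equal_sort_imports := by
  intro xs _
  unfold Spec_sort_imports
  have hrk : ∀ t : Bool × String × String, rankB t ∈ pvR := by
    intro t
    rcases pv_rank_bounds t with ⟨h0, h1⟩
    simp only [pvR, List.mem_cons, List.mem_singleton]
    omega
  have hblkrank : ∀ r, r ∈ pvR → ∀ t,
      t ∈ (PySem.List.sorted xs (fun t => toLex (t.2.1, t.2.2))).filter
        (fun t => decide (rankB t = r)) → rankB t = r := by
    intro r _ t ht
    exact of_decide_eq_true (List.mem_filter.mp ht).2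
  have hB : sort_imports_alt xs
      = stripTrailB (pvEn (fun r => (PySem.List.sorted xs (fun t => toLex (t.2.1, t.2.2))).filter
          (fun t => decide (rankB t = r))) pvR) := by
    simp only [sort_imports_alt]
    rw [pv_sorted2_eq_lex, pv_sorted_flat rankB pvR (by decide) _ (fun y _ => hrk y),
      pv_main_none _ pvR (by decide) hblkrank]
  have hany : ∀ g, pvBkt xs g ≠ [] → (xs.any fun t => decide (pvGroupOf t = g)) = true := by
    intro g hg
    rcases List.exists_mem_of_ne_nil _ hg with ⟨t, ht⟩
    rcases List.mem_filter.mp ht with ⟨ht1, ht2⟩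
    exact List.any_eq_true.mpr ⟨t, ht1, ht2⟩
  have hnone : ∀ g, pvBkt xs g = [] → (xs.any fun t => decide (pvGroupOf t = g)) = false := by
    intro g hg
    rw [List.any_eq_false]
    intro t ht
    exact (List.filter_eq_nil_iff.mp hg) t ht
  have hA : sort_imports xs = stripTrailA (pvLabels.flatMap (fun g =>
      if pvBkt xs g = [] then []
      else (PySem.List.sorted2 ((pvBkt xs g).map pvProj) (fun p => p.1) (fun p => p.2)).map
          (fun p => p.2) ++ [""])) := by
    simp only [sort_imports]
    simp only [pv_groups_getD, pv_groups_contains, PySem.Dict.getD_empty,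
      PySem.Dict.contains_empty, Bool.false_or, List.nil_append]
    rw [PySem.List.foldl_congr_mem IMPORT_ORDER _ (fun acc g => acc ++ (if pvBkt xs g = [] then []
        else (PySem.List.sorted2 ((pvBkt xs g).map pvProj) (fun p => p.1) (fun p => p.2)).map
          (fun p => p.2) ++ [""])) [] ?hpt, PySem.List.foldl_append_eq_flatMap]
    case hpt =>
      intro acc g _
      by_cases hg : pvBkt xs g = []
      · simp [hg, hnone g hg]
      · simp [hg, hany g hg, List.append_assoc]
    rw [show pvLabels = IMPORT_ORDER ++ ["zzz_other"] from rfl, List.flatMap_append,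
      List.flatMap_cons, List.flatMap_nil]
    by_cases hz : pvBkt xs "zzz_other" = []
    · simp [hz, hnone _ hz]
    · simp [hz, hany _ hz, List.append_assoc]
  have hreidx : ∀ (F : String → List String),
      pvLabels.flatMap F = pvR.flatMap (fun r => F (pvLabels.getD r.toNat "")) := by
    intro F
    rfl
  have hbridge : pvLabels.flatMap (fun g =>
      if pvBkt xs g = [] then []
      else (PySem.List.sorted2 ((pvBkt xs g).map pvProj) (fun p => p.1) (fun p => p.2)).map
          (fun p => p.2) ++ [""])
      = pvJ (fun r => (PySem.List.sorted xs (fun t => toLex (t.2.1, t.2.2))).filter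
          (fun t => decide (rankB t = r))) pvR := by
    rw [hreidx]
    simp only [pvJ]
    refine pv_flatMap_congr _ _ _ (fun r hr => ?_)
    have h01 : 0 ≤ r ∧ r ≤ 10 := by
      simp only [pvR, List.mem_cons, List.not_mem_nil, or_false] at hr
      rcases hr with rfl|rfl|rfl|rfl|rfl|rfl|rfl|rfl|rfl|rfl|rfl <;> norm_num
    rw [pv_filter_rank_group xs r h01.1 h01.2]
    by_cases hbase : xs.filter (fun t => decide (rankB t = r)) = []
    · have hsn : (PySem.List.sorted xs (fun t => toLex (t.2.1, t.2.2))).filter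
          (fun t => decide (rankB t = r)) = [] := by
        rw [pv_filter_sorted, hbase]
        simp [PySem.List.sorted]
      simp [hbase, hsn]
    · have hsn : (PySem.List.sorted xs (fun t => toLex (t.2.1, t.2.2))).filter
          (fun t => decide (rankB t = r)) ≠ [] := by
        rw [pv_filter_sorted]
        exact fun h => hbase ((PySem.List.sorted_eq_nil_iff _ _ _).mp h)
      simp only [hbase, hsn, if_false]
      simp only [pv_sorted2_eq_lex]
      rw [← pv_map_sorted pvProj (fun t => toLex (t.2.1, t.2.2)) (fun p => toLex (p.1, p.2))
          (fun t => rfl)]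
      rw [pv_filter_sorted]
      simp [List.map_map, pvProj, Function.comp]
  rw [hA, hbridge, pv_strip_J, pv_stripA_eq_B, hB]
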